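-- pv_equiv track=rewrite | github.com/Xenokrat/ASD_course_2 | balanced_bst.py | _generate_bbst_array
-- ===== SOURCE A (Python) =====
-- from typing import List
--
-- def _generate_bbst_array(array: List[int]) -> List[int]:
--     """Recursivly return left / right root's children"""
--
--     mid = len(array) // 2
--     if mid < 2:
--         return []
--
--     left_array = array[:mid]
--     right_array = array[mid:]
--
--     left_child = _get_root(left_array)
--     right_child = _get_root(right_array)
--
--     return (
--         [left_child, right_child]
--         + _generate_bbst_array(array[:mid])
--         + _generate_bbst_array(array[mid:])
--     )
--
-- def _get_root(array: List[int]) -> int: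
--     """Return root as center element of array"""
--
--     return array[len(array) // 2]
-- ===== SOURCE B (Python) =====
-- from typing import List
--
-- def _generate_bbst_array(array: List[int]) -> List[int]:
--     """Iterative version: explicit LIFO stack of (start, end) index ranges
--     into the original array; no slicing, no recursion."""
--     result = []
--     stack = [(0, len(array))]
--     while stack:
--         start, end = stack.pop()
--         length = end - start
--         mid = length // 2
--         if mid < 2:
--             continue
--         result.append(array[start + mid // 2])
--         result.append(array[start + mid + (length - mid) // 2])
--         stack.append((start + mid, end))   # right half, processed after
--         stack.append((start, start + mid)) # left half, processed next (preorder)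
--     return result
-- ===== Notes on version B (the rewrite author's own statement) =====
-- stated objective: faster
-- what changed: Replaces the recursive slice-and-recurse formulation (which copies subarrays at every level) by an iterative explicit-stack loop over (start,end) index ranges into the original array, computing child roots by index arithmetic with no list copying and no recursion.
import Mathlib
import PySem

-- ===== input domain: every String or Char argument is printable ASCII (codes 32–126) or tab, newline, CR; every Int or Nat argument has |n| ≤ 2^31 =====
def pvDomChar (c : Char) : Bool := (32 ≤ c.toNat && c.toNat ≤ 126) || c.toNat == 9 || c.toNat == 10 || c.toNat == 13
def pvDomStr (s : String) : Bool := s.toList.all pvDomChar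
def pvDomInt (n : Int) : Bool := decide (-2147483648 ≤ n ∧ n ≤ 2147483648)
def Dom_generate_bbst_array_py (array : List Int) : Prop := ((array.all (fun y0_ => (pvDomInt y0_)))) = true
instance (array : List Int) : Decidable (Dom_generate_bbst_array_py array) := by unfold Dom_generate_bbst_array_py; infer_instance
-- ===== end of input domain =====

-- B replaces A's slice-and-recurse with an iterative explicit stack of (start,end)
-- index ranges into the original array (no slicing, no recursion); same output.

-- ===== PORT A =====
-- array[len(array)//2]; within A it is only applied to nonempty slices, where pyGet? is some,
-- so the .getD 0 default is never the result.
def get_root_py (a : List Int) : Int :=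
  (PySem.List.pyGet? a ((a.length / 2 : Nat) : Int)).getD 0

-- A's recursion, with a fuel guard for totality only: fuel starts at array.length and
-- every recursive call is on a strictly shorter slice, so fuel never runs out.
def genBbstA : Nat → List Int → List Int
  | 0, _ => []
  | f + 1, array =>
    let mid := array.length / 2
    if mid < 2 then []
    else
      let left_array := PySem.List.slice array none (some ((mid : Nat) : Int))
      let right_array := PySem.List.slice array (some ((mid : Nat) : Int)) none
      let left_child := get_root_py left_array
      let right_child := get_root_py right_array
      [left_child, right_child]
        ++ genBbstA f (PySem.List.slice array none (some ((mid : Nat) : Int)))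
        ++ genBbstA f (PySem.List.slice array (some ((mid : Nat) : Int)) none)

def generate_bbst_array_py (array : List Int) : List Int :=
  genBbstA array.length array

-- ===== PORT B =====
-- the while-stack loop of Source B; the two array[i] accesses always have 0 ≤ i < len,
-- where pyGet? is some, so .getD 0 is exact. Fuel guards totality only: each iteration
-- strictly decreases the sum of (2*(e-s)-1 ⊔ 1) over the stack, which starts ≤ 2*len+1.
def bbstLoop : Nat → List Int → List (Nat × Nat) → List Int → List Int
  | 0, _, _, result => result
  | f + 1, array, stack, result =>
    match stack with
    | [] => result
    | (s, e) :: rest =>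
      let L := e - s
      let mid := L / 2
      if mid < 2 then bbstLoop f array rest result
      else
        bbstLoop f array ((s, s + mid) :: (s + mid, e) :: rest)
          (result ++ [(PySem.List.pyGet? array ((s + mid / 2 : Nat) : Int)).getD 0,
                      (PySem.List.pyGet? array ((s + mid + (L - mid) / 2 : Nat) : Int)).getD 0])

def generate_bbst_array_py_alt (array : List Int) : List Int :=
  bbstLoop (2 * array.length + 1) array [(0, array.length)] []

-- ===== PRECONDITION & SPEC =====
def Spec_generate_bbst_array_py (array : List Int) (out : List Int) : Prop := out = generate_bbst_array_py_alt array
instance (array : List Int) (out : List Int) : Decidable (Spec_generate_bbst_array_py array out) := by unfold Spec_generate_bbst_array_py; infer_instance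

-- ===== CLAIM (what is proved, stated in full; the proofs are below) =====
def Claim_equal_generate_bbst_array_py : Prop := ∀ (array : List Int), Dom_generate_bbst_array_py array → Spec_generate_bbst_array_py array (generate_bbst_array_py array)

-- ===== LEMMAS AND PROOFS =====

-- A's fuel is irrelevant as long as it is at least the slice length
lemma genBbstA_fuel : ∀ (f f' : Nat) (array : List Int),
    array.length ≤ f → array.length ≤ f' → genBbstA f array = genBbstA f' array := by
  intro f
  induction f with
  | zero =>
    intro f' array hf hf'
    have h0 : array = [] := List.eq_nil_of_length_eq_zero (by omega)
    subst h0
    cases f' <;> simp [genBbstA]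
  | succ f ih =>
    intro f' array hf hf'
    cases f' with
    | zero =>
      have h0 : array = [] := List.eq_nil_of_length_eq_zero (by omega)
      subst h0
      simp [genBbstA]
    | succ f' =>
      simp only [genBbstA]
      by_cases hmid : array.length / 2 < 2
      · rw [if_pos hmid, if_pos hmid]
      · rw [if_neg hmid, if_neg hmid]
        have hlenL : (PySem.List.slice array none (some ((array.length / 2 : Nat) : Int))).length
            ≤ array.length / 2 := by
          rw [PySem.List.slice_to_natCast]
          simp [List.length_take]
        have hlenR : (PySem.List.slice array (some ((array.length / 2 : Nat) : Int)) none).length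
            = array.length - array.length / 2 := by
          rw [PySem.List.slice_from_natCast]
          simp [List.length_drop]
        rw [ih f' _ (by omega) (by omega), ih f' _ (by omega) (by omega)]

-- weight of a stack: an upper bound on the number of remaining loop iterations
def wsum (st : List (Nat × Nat)) : Nat :=
  (st.map (fun p => max 1 (2 * (p.2 - p.1) - 1))).sum

lemma wsum_cons (s e : Nat) (rest : List (Nat × Nat)) :
    wsum ((s, e) :: rest) = max 1 (2 * (e - s) - 1) + wsum rest := by
  simp [wsum]

-- B's fuel is irrelevant as long as it is at least the stack weight
lemma bbstLoop_fuel (array : List Int) : ∀ (f f' : Nat) (stack : List (Nat × Nat)) (res : List Int),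
    wsum stack ≤ f → wsum stack ≤ f' → bbstLoop f array stack res = bbstLoop f' array stack res := by
  intro f
  induction f with
  | zero =>
    intro f' stack res hf hf'
    match stack with
    | [] => cases f' <;> rfl
    | (s, e) :: rest => rw [wsum_cons] at hf; omega
  | succ f ih =>
    intro f' stack res hf hf'
    match stack with
    | [] => cases f' <;> rfl
    | (s, e) :: rest =>
      cases f' with
      | zero => rw [wsum_cons] at hf'; omega
      | succ f' =>
        rw [wsum_cons] at hf hf'
        simp only [bbstLoop]
        by_cases hmid : (e - s) / 2 < 2
        · rw [if_pos hmid, if_pos hmid]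
          exact ih f' rest res (by omega) (by omega)
        · rw [if_neg hmid, if_neg hmid]
          apply ih
          · rw [wsum_cons, wsum_cons]; omega
          · rw [wsum_cons, wsum_cons]; omega

-- in-range element of a segment of the original array
lemma seg_getElem? (array : List Int) (s i n : Nat) (hi : i < n) (hlen : s + n ≤ array.length) :
    ((array.drop s).take n)[i]? = some (array[s + i]'(by omega)) := by
  rw [List.getElem?_take_of_lt hi, List.getElem?_drop]
  exact List.getElem?_eq_getElem (by omega)

lemma getD_in_range (array : List Int) (i : Nat) (hi : i < array.length) :
    (PySem.List.pyGet? array ((i : Nat) : Int)).getD 0 = array[i] := by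
  rw [PySem.List.pyGet?_natCast, List.getElem?_eq_getElem hi]
  rfl

-- one unfolding step of A (any positive amount of fuel beyond the length behaves alike)
lemma generate_unfold (a : List Int) :
    generate_bbst_array_py a =
      if a.length / 2 < 2 then []
      else
        [get_root_py (PySem.List.slice a none (some ((a.length / 2 : Nat) : Int))),
         get_root_py (PySem.List.slice a (some ((a.length / 2 : Nat) : Int)) none)]
          ++ generate_bbst_array_py (PySem.List.slice a none (some ((a.length / 2 : Nat) : Int)))
          ++ generate_bbst_array_py (PySem.List.slice a (some ((a.length / 2 : Nat) : Int)) none) := by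
  cases hc : a.length with
  | zero =>
    have h0 : a = [] := List.eq_nil_of_length_eq_zero hc
    subst h0
    simp [generate_bbst_array_py, genBbstA]
  | succ m =>
    rw [generate_bbst_array_py, hc]
    simp only [genBbstA, hc]
    by_cases hm2 : (m + 1) / 2 < 2
    · rw [if_pos hm2, if_pos hm2]
    · rw [if_neg hm2, if_neg hm2]
      have hlenL : (PySem.List.slice a none (some (((m + 1) / 2 : Nat) : Int))).length ≤ m := by
        rw [PySem.List.slice_to_natCast]
        simp only [List.length_take, hc]
        omega
      have hlenR : (PySem.List.slice a (some (((m + 1) / 2 : Nat) : Int)) none).length ≤ m := by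
        rw [PySem.List.slice_from_natCast]
        simp only [List.length_drop, hc]
        omega
      rw [generate_bbst_array_py, generate_bbst_array_py,
          genBbstA_fuel m _ _ (by omega) (le_refl _),
          genBbstA_fuel m _ _ (by omega) (le_refl _)]

-- one stack entry unfolds to A's result on the corresponding segment
lemma bbstLoop_seg (array : List Int) :
    ∀ (n s e : Nat), e - s ≤ n → s ≤ e → e ≤ array.length →
    ∀ (st : List (Nat × Nat)) (res : List Int),
    bbstLoop (wsum ((s, e) :: st)) array ((s, e) :: st) res
      = bbstLoop (wsum st) array st (res ++ generate_bbst_array_py ((array.drop s).take (e - s))) := by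
  intro n
  induction n with
  | zero =>
    intro s e hn hse he st res
    have h0 : e - s = 0 := by omega
    have hw : wsum ((s, e) :: st) = wsum st + 1 := by rw [wsum_cons, h0]; omega
    rw [hw]
    simp only [bbstLoop]
    rw [if_pos (by omega : (e - s) / 2 < 2), h0]
    simp [generate_bbst_array_py, genBbstA]
  | succ n ih =>
    intro s e hn hse he st res
    set L := e - s with hL
    have hseg : ((array.drop s).take L).length = L := by
      simp [List.length_take, List.length_drop]; omega
    obtain ⟨k, hk⟩ : ∃ k, wsum ((s, e) :: st) = k + 1 :=
      ⟨wsum ((s, e) :: st) - 1, by rw [wsum_cons]; omega⟩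
    rw [hk]
    by_cases hmid : L / 2 < 2
    · -- discarded range: A returns [] on the segment too
      have hA : generate_bbst_array_py ((array.drop s).take L) = [] := by
        rw [generate_unfold, hseg, if_pos hmid]
      rw [hA]
      simp only [bbstLoop, ← hL]
      rw [if_pos hmid, List.append_nil]
      apply bbstLoop_fuel
      · rw [wsum_cons] at hk; omega
      · omega
    · set mid := L / 2 with hm
      have h4 : 4 ≤ L := by omega
      have hsliceL : PySem.List.slice ((array.drop s).take L) none (some ((mid : Nat) : Int))
          = (array.drop s).take mid := by
        rw [PySem.List.slice_to_natCast, List.take_take]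
        congr 1; omega
      have hsliceR : PySem.List.slice ((array.drop s).take L) (some ((mid : Nat) : Int)) none
          = (array.drop (s + mid)).take (e - (s + mid)) := by
        rw [PySem.List.slice_from_natCast, List.drop_take, List.drop_drop]
        congr 1 <;> omega
      have hlenL : ((array.drop s).take mid).length = mid := by
        simp [List.length_take, List.length_drop]; omega
      have hlenR : ((array.drop (s + mid)).take (e - (s + mid))).length = L - mid := by
        simp [List.length_take, List.length_drop]; omega
      have hlc : get_root_py ((array.drop s).take mid)
          = array[s + mid / 2]'(by omega) := by
        rw [get_root_py, hlenL, PySem.List.pyGet?_natCast]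
        rw [seg_getElem? array s (mid / 2) mid (by omega) (by omega)]
        rfl
      have hrc : get_root_py ((array.drop (s + mid)).take (e - (s + mid)))
          = array[s + mid + (L - mid) / 2]'(by omega) := by
        rw [get_root_py, hlenR, PySem.List.pyGet?_natCast]
        rw [seg_getElem? array (s + mid) ((L - mid) / 2) (e - (s + mid)) (by omega) (by omega)]
        rfl
      -- unfold A once on the segment
      rw [generate_unfold ((array.drop s).take L)]
      simp only [hseg, ← hm]
      rw [if_neg hmid, hsliceL, hsliceR, hlc, hrc]
      -- unfold B once
      simp only [bbstLoop, ← hL, ← hm]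
      rw [if_neg hmid]
      rw [getD_in_range array (s + mid / 2) (by omega),
          getD_in_range array (s + mid + (L - mid) / 2) (by omega)]
      -- normalize B's fuel to the new stack's weight, then apply the IH twice
      rw [bbstLoop_fuel array k (wsum ((s, s + mid) :: (s + mid, e) :: st)) _ _
            (by rw [wsum_cons] at hk; rw [wsum_cons, wsum_cons]; omega)
            (le_refl _)]
      have h1 : s + mid - s = mid := by omega
      rw [ih s (s + mid) (by omega) (by omega) (by omega),
          ih (s + mid) e (by omega) (by omega) (by omega), h1]
      simp

-- ===== VERDICT (by name: the statement is the Claim_ definition above) =====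
theorem generate_bbst_array_py_spec : Claim_equal_generate_bbst_array_py := by
  intro array _
  unfold Spec_generate_bbst_array_py generate_bbst_array_py_alt
  rw [bbstLoop_fuel array (2 * array.length + 1) (wsum [(0, array.length)]) _ _
        (by rw [wsum_cons]; simp [wsum]; omega) (le_refl _)]
  rw [bbstLoop_seg array array.length 0 array.length (by omega) (by omega) (by omega)]
  simp [wsum, bbstLoop]
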